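-- pv_equiv track=rewrite | github.com/avanetten/shackleton | src/shackleton/utils.py | value_by_key_prefix
-- ===== SOURCE A (Python) =====
-- def value_by_key_prefix(d, partial):
--     '''Access dict values with incomplete keys, as long as there
--     are not more than one entry for a given string. Use key prefix'''
--
--     default_val = 'unknown'
--     matches = []
--     matches = [val for key, val in d.items() if key.startswith(partial)]
--     # for key, val in d.items():
--     #    if type(key) == list:
--     #        keycheck = key[0]
--     #    else:
--     #        keycheck = key
--     #    print ("key, partial:", key, partial)
--     #    if keycheck.startswith(partial):
--     #        matches.append(val)
--     #matches = [val for key, val in d.iteritems() if key.startswith(partial)]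
--
--     if not matches:
--         #raise KeyError(partial)
--         # instead of raising an error, use default value
--         return default_val
--     elif len(matches) > 1:
--         raise ValueError('{} matches more than one key'.format(partial))
--     else:
--         return matches[0]
-- ===== SOURCE B (Python) =====
-- def value_by_key_prefix(d, partial):
--     '''Access dict values with incomplete keys, as long as there
--     are not more than one entry for a given string. Use key prefix'''
--     # Sort the items by key: all keys sharing the prefix form one contiguous
--     # block, starting at the first key >= partial.  Binary-search for that
--     # position; then only that entry and its immediate successor need testing.
--     pairs = sorted(d.items(), key=lambda kv: kv[0])
--     lo, hi = 0, len(pairs)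
--     while lo < hi:  # bisect_left for `partial` among the keys
--         mid = (lo + hi) // 2
--         if pairs[mid][0] < partial:
--             lo = mid + 1
--         else:
--             hi = mid
--     if lo == len(pairs) or not pairs[lo][0].startswith(partial):
--         return 'unknown'
--     if lo + 1 < len(pairs) and pairs[lo + 1][0].startswith(partial):
--         raise ValueError('{} matches more than one key'.format(partial))
--     return pairs[lo][1]
-- ===== Notes on version B (the rewrite author's own statement) =====
-- stated objective: alternative
-- what changed: Instead of filtering all items and checking the match count, B sorts the items by key and binary-searches (hand-rolled bisect_left) for the prefix; since prefix matches are contiguous in sorted key order, only the found entry and its immediate successor are tested.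
import Mathlib
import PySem

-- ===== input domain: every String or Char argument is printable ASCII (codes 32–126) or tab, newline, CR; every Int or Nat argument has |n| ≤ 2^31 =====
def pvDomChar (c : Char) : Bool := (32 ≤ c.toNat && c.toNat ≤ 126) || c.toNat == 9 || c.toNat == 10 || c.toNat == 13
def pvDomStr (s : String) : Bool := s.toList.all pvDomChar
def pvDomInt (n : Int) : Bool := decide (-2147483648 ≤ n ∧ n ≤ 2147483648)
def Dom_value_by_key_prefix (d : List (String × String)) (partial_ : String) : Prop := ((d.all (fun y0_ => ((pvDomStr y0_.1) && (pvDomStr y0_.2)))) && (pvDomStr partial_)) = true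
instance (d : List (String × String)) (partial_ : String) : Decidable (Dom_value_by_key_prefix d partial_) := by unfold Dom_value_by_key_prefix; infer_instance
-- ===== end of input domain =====

-- B replaces A's full filter pass with sort-by-key + hand-rolled binary search: prefix matches are
-- contiguous in key order, so only the found position and its successor are tested (alternative
-- algorithm, same return value; both raise ValueError on >1 match, which Pre_ excludes).

-- ===== PORT A =====
-- matches = [val for key, val in d.items() if key.startswith(partial)];
-- if not matches: return 'unknown'; elif len(matches) > 1: raise ValueError (outside Pre_); else matches[0]
def value_by_key_prefix (d : List (String × String)) (partial_ : String) : String :=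
  let ms := (d.filter (fun kv => PySem.Str.startswith kv.1 partial_)).map (fun kv => kv.2)
  if ms = [] then "unknown"
  else if ms.length > 1 then "unknown"  -- unreachable under Pre_: Python raises ValueError here
  else ms.headD "unknown"

-- ===== PORT B =====
-- the while-loop of Source B: bisect_left for `partial` among the keys of `pairs` on the range [lo, hi)
def pvBisect (pairs : List (String × String)) (partial_ : String) (lo hi : Nat) : Nat :=
  if lo < hi then
    let mid := (lo + hi) / 2
    if (pairs.getD mid ("", "")).1 < partial_ then pvBisect pairs partial_ (mid + 1) hi
    else pvBisect pairs partial_ lo mid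
  else lo
termination_by hi - lo
decreasing_by all_goals omega

-- pairs = sorted(d.items(), key=lambda kv: kv[0]); lo = the bisection result;
-- test pairs[lo] and pairs[lo+1] only (the prefix block is contiguous in sorted key order)
def value_by_key_prefix_alt (d : List (String × String)) (partial_ : String) : String :=
  let pairs := PySem.List.sorted d (fun kv => kv.1) false
  let lo := pvBisect pairs partial_ 0 pairs.length
  if lo = pairs.length ∨ ¬ PySem.Str.startswith (pairs.getD lo ("", "")).1 partial_ then "unknown"
  else if lo + 1 < pairs.length ∧ PySem.Str.startswith (pairs.getD (lo + 1) ("", "")).1 partial_ then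
    "unknown"  -- unreachable under Pre_: Python raises ValueError here
  else (pairs.getD lo ("", "")).2

-- ===== PRECONDITION & SPEC =====
-- Pre_ excludes exactly the inputs where at least two keys start with partial_: there both
-- A and B raise ValueError instead of returning a value.
def Pre_value_by_key_prefix (d : List (String × String)) (partial_ : String) : Prop :=
  (d.countP (fun kv => PySem.Str.startswith kv.1 partial_)) ≤ 1
instance (d : List (String × String)) (partial_ : String) : Decidable (Pre_value_by_key_prefix d partial_) := by unfold Pre_value_by_key_prefix; infer_instance

def pvWitness_value_by_key_prefix : (List (String × String)) × String :=
  ([("abc", "1"), ("bcd", "2")], "ab")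

def Spec_value_by_key_prefix (d : List (String × String)) (partial_ : String) (out : String) : Prop := out = value_by_key_prefix_alt d partial_
instance (d : List (String × String)) (partial_ : String) (out : String) : Decidable (Spec_value_by_key_prefix d partial_ out) := by unfold Spec_value_by_key_prefix; infer_instance

-- ===== CLAIM (what is proved, stated in full; the proofs are below) =====
def Claim_equal_value_by_key_prefix : Prop := ∀ (d : List (String × String)) (partial_ : String), Dom_value_by_key_prefix d partial_ → Pre_value_by_key_prefix d partial_ → Spec_value_by_key_prefix d partial_ (value_by_key_prefix d partial_)

-- ===== LEMMAS AND PROOFS =====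

-- a prefix is never lexicographically greater: p <+: k → ¬ k < p  (on code-point lists)
lemma pvPrefix_not_lt (p k : List Char) (h : p <+: k) : ¬ k < p := by
  induction p generalizing k with
  | nil => exact List.not_lt_nil k
  | cons c p' ih =>
    obtain ⟨t, rfl⟩ := h
    intro hlt
    rw [List.cons_append, List.cons_lt_cons_iff] at hlt
    rcases hlt with h1 | ⟨_, h2⟩
    · exact lt_irrefl c h1
    · exact ih (p' ++ t) ⟨t, rfl⟩ h2

-- sandwich: if p ≤ x ≤ y (as ¬ x < p and ¬ y < x) and p is a prefix of y, p is a prefix of x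
lemma pvPrefix_sandwich (p x y : List Char) (hpy : p <+: y) (hxp : ¬ x < p) (hyx : ¬ y < x) :
    p <+: x := by
  induction p generalizing x y with
  | nil => exact List.nil_prefix
  | cons c p' ih =>
    obtain ⟨t, rfl⟩ := hpy
    cases x with
    | nil => exact absurd (List.nil_lt_cons c _) hxp
    | cons a x' =>
      rw [List.cons_append] at hyx
      have hac : a = c := by
        by_contra hne
        rcases lt_or_gt_of_ne hne with h | h
        · exact hxp (List.cons_lt_cons_iff.mpr (Or.inl h))
        · exact hyx (List.cons_lt_cons_iff.mpr (Or.inl h))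
      subst hac
      have hxp' : ¬ x' < p' := fun h => hxp (List.cons_lt_cons_iff.mpr (Or.inr ⟨rfl, h⟩))
      have hyx' : ¬ (p' ++ t) < x' := fun h => hyx (List.cons_lt_cons_iff.mpr (Or.inr ⟨rfl, h⟩))
      obtain ⟨u, hu⟩ := ih x' (p' ++ t) ⟨t, rfl⟩ hxp' hyx'
      exact ⟨u, by rw [List.cons_append, hu]⟩

-- two distinct positions both satisfying P give countP ≥ 2
lemma pvCountP_two {α : Type} (P : α → Bool) (l : List α) (i j : Nat)
    (hj : j < l.length) (hij : i < j) (h1 : P (l[i]'(by omega)) = true) (h2 : P l[j] = true) :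
    2 ≤ l.countP P := by
  have hsplit : l = l.take j ++ l.drop j := (List.take_append_drop j l).symm
  have hti : i < (l.take j).length := by rw [List.length_take]; omega
  have hdj : 0 < (l.drop j).length := by rw [List.length_drop]; omega
  have c1 : 0 < (l.take j).countP P := by
    rw [List.countP_pos_iff]
    exact ⟨(l.take j)[i], List.getElem_mem _, by rw [List.getElem_take]; exact h1⟩
  have c2 : 0 < (l.drop j).countP P := by
    rw [List.countP_pos_iff]
    refine ⟨(l.drop j)[0], List.getElem_mem _, ?_⟩
    rw [List.getElem_drop]
    simpa using h2
  calc 2 ≤ (l.take j).countP P + (l.drop j).countP P := by omega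
    _ = l.countP P := by rw [← List.countP_append, ← hsplit]

-- postcondition of the binary search: it finds the first position whose key is not < partial_
lemma pvBisect_spec (pairs : List (String × String)) (partial_ : String) :
    ∀ (n lo hi : Nat), hi - lo = n → lo ≤ hi → hi ≤ pairs.length →
    pairs.Pairwise (fun a b => a.1 ≤ b.1) →
    (∀ i (_ : i < pairs.length), i < lo → pairs[i].1 < partial_) →
    (∀ i (_ : i < pairs.length), hi ≤ i → ¬ pairs[i].1 < partial_) →
    lo ≤ pvBisect pairs partial_ lo hi ∧ pvBisect pairs partial_ lo hi ≤ hi ∧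
    (∀ i (_ : i < pairs.length), i < pvBisect pairs partial_ lo hi → pairs[i].1 < partial_) ∧
    (∀ i (_ : i < pairs.length), pvBisect pairs partial_ lo hi ≤ i → ¬ pairs[i].1 < partial_) := by
  intro n
  induction n using Nat.strong_induction_on with
  | _ n ih =>
    intro lo hi hn hle hhilen hsort hlo hhi
    rw [pvBisect]
    by_cases hlt : lo < hi
    · rw [if_pos hlt]
      set mid := (lo + hi) / 2 with hmid
      have hmlt : mid < hi := by omega
      have hmge : lo ≤ mid := by omega
      have hmlen : mid < pairs.length := by omega
      have hgetd : pairs.getD mid ("", "") = pairs[mid] := List.getD_eq_getElem _ _ hmlen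
      have hmono := List.pairwise_iff_getElem.mp hsort
      by_cases hc : (pairs.getD mid ("", "")).1 < partial_
      · rw [if_pos hc]
        rw [hgetd] at hc
        refine (ih (hi - (mid + 1)) (by omega) (mid + 1) hi (by omega) (by omega) hhilen hsort ?_ hhi).imp (by omega) (fun h => h)
        intro i hilen hilt
        rcases Nat.lt_or_ge i mid with h | h
        · exact lt_of_le_of_lt (hmono i mid hilen hmlen h) hc
        · have : i = mid := by omega
          subst this; exact hc
      · rw [if_neg hc]
        rw [hgetd] at hc
        refine (ih (mid - lo) (by omega) lo mid (by omega) (by omega) (by omega) hsort hlo ?_).imp (fun h => h) (fun h => ⟨by omega, h.2⟩)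
        intro i hilen hge
        rcases Nat.lt_or_ge mid i with h | h
        · intro hlt'
          exact hc (lt_of_le_of_lt (hmono mid i hmlen hilen h) hlt')
        · have : i = mid := by omega
          subst this; exact hc
    · rw [if_neg hlt]
      have : lo = hi := by omega
      subst this
      exact ⟨le_refl _, le_refl _, fun i h hi => hlo i h hi, fun i h hi => hhi i h hi⟩

-- the heart of the equivalence: on ≤ 1 prefix match, filter-then-head equals sort + bisect + local test
lemma pvMain (d : List (String × String)) (partial_ : String)
    (hpre : (d.countP (fun kv => PySem.Str.startswith kv.1 partial_)) ≤ 1) :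
    value_by_key_prefix d partial_ = value_by_key_prefix_alt d partial_ := by
  simp only [value_by_key_prefix, value_by_key_prefix_alt]
  set P := fun kv : String × String => PySem.Str.startswith kv.1 partial_ with hP
  set pairs := PySem.List.sorted d (fun kv => kv.1) false with hpairs
  set l := pvBisect pairs partial_ 0 pairs.length with hl
  have hperm : pairs.Perm d := PySem.List.sorted_perm d _ false
  have hsort : pairs.Pairwise (fun a b => a.1 ≤ b.1) := PySem.List.sorted_pairwise d _
  have hmono := List.pairwise_iff_getElem.mp hsort
  have hcount : pairs.countP P = d.countP P := hperm.countP_eq P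
  obtain ⟨-, hlle, hbelow, habove⟩ :=
    pvBisect_spec pairs partial_ pairs.length 0 pairs.length rfl (by omega) (le_refl _) hsort
      (by intro i _ h; omega) (by intro i h1 h2; omega)
  have hstart_not_lt : ∀ kv : String × String, P kv = true → ¬ kv.1 < partial_ := by
    intro kv h hlt
    simp only [hP, PySem.Str.startswith_eq] at h
    exact pvPrefix_not_lt _ _ ((PySem.Chars.startswith_iff _ _).mp h)
      (String.lt_iff_toList_lt.mp hlt)
  cases hfil : d.filter P with
  | nil =>
    have hnone : ∀ kv ∈ pairs, ¬ P kv = true := by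
      intro kv hkv hPkv
      have : kv ∈ d.filter P := List.mem_filter.mpr ⟨hperm.mem_iff.mp hkv, hPkv⟩
      rw [hfil] at this; exact absurd this (List.not_mem_nil)
    have hcond : l = pairs.length ∨ ¬ PySem.Str.startswith (pairs.getD l ("", "")).1 partial_ := by
      rcases Nat.lt_or_ge l pairs.length with h | h
      · right
        rw [List.getD_eq_getElem _ _ h]
        exact fun hsw => hnone _ (List.getElem_mem _) hsw
      · left; omega
    rw [if_pos hcond]
    simp
  | cons kv rest =>
    have hrest : rest = [] := by
      have h1 : d.countP P = (d.filter P).length := List.countP_eq_length_filter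
      rw [hfil] at h1
      simp at h1
      have := hpre
      rw [h1] at this
      simpa using List.length_eq_zero_iff.mp (by omega)
    subst hrest
    have hkvmem : kv ∈ d.filter P := by rw [hfil]; exact List.mem_singleton_self kv
    have hPkv : P kv = true := (List.mem_filter.mp hkvmem).2
    have hcount1 : pairs.countP P = 1 := by
      rw [hcount, List.countP_eq_length_filter, hfil]; rfl
    have hkvpairs : kv ∈ pairs := hperm.mem_iff.mpr (List.mem_filter.mp hkvmem).1
    obtain ⟨j, hjlen, hj⟩ := List.getElem_of_mem hkvpairs
    have hjP : P pairs[j] = true := by rw [hj]; exact hPkv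
    have hjnotlt : ¬ pairs[j].1 < partial_ := hstart_not_lt _ hjP
    have hlj : l ≤ j := by
      by_contra h
      exact hjnotlt (hbelow j hjlen (by omega))
    have hllen : l < pairs.length := by omega
    have hPl : P (pairs[l]'hllen) = true := by
      rcases Nat.eq_or_lt_of_le hlj with h | h
      · simp only [h]; exact hjP
      · have hxp : ¬ pairs[l].1 < partial_ := habove l hllen (le_refl _)
        have hle : pairs[l].1 ≤ pairs[j].1 := hmono l j hllen hjlen h
        simp only [hP, PySem.Str.startswith_eq]
        rw [PySem.Chars.startswith_iff]
        apply pvPrefix_sandwich _ _ (pairs[j].1.toList)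
        · simp only [hP, PySem.Str.startswith_eq] at hjP
          exact (PySem.Chars.startswith_iff _ _).mp hjP
        · exact fun hlt => hxp (String.lt_iff_toList_lt.mpr hlt)
        · exact fun hlt => (not_lt.mpr hle) (String.lt_iff_toList_lt.mpr hlt)
    have hlj' : l = j := by
      by_contra hne
      have hltj : l < j := by omega
      have := pvCountP_two P pairs l j hjlen hltj hPl hjP
      omega
    have hpl_kv : pairs[l]'hllen = kv := by
      subst hlj'; exact hj
    have hcond1 : ¬ (l = pairs.length ∨ ¬ PySem.Str.startswith (pairs.getD l ("", "")).1 partial_) := by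
      rintro (h | h)
      · omega
      · rw [List.getD_eq_getElem _ _ hllen] at h
        exact h hPl
    have hcond2 : ¬ (l + 1 < pairs.length ∧ PySem.Str.startswith (pairs.getD (l + 1) ("", "")).1 partial_) := by
      rintro ⟨hlen2, hsw⟩
      rw [List.getD_eq_getElem _ _ hlen2] at hsw
      have := pvCountP_two P pairs l (l + 1) hlen2 (by omega) hPl hsw
      omega
    rw [if_neg hcond1, if_neg hcond2, List.getD_eq_getElem _ _ hllen, hpl_kv]
    simp

-- ===== VERDICT (by name: the statement is the Claim_ definition above) =====
theorem value_by_key_prefix_spec : Claim_equal_value_by_key_prefix := by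
  intro d partial_ _ hpre
  exact pvMain d partial_ hpre
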